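-- pv_equiv track=rewrite | github.com/TheMetaNetProject/metapers | inflectPersian.py | inflectVerbs
-- ===== SOURCE A (Python) =====
-- def inflectVerbs(stem, isPast):
--         infs = []
--         persSuffs = [u"م", u"ی", u"د", u"یم", u"ید", u"ند"]
--         persSuffs2 = [u"ام", u"ای", u"است", u"ایم", u"اید", u"اند"]
--         persSuffs3 = [u"بودم", u"بودی", u"بود", u"بودیم", u"بودید", u"بودند", u"باشم", u"باشی", u"باشد", u"باشیم", u"باشید", u"باشند"]
--         stemStart = stemStart = ""
--         stemEnd = stem
--         stemEnd = stem
--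
--         # compound verbs
--         if stem.count(" ") > 0:
--             # break the stem
--             bStem = stem.split()
--             stemStart = " ".join(bStem[:-1])
--             stemEnd = bStem[-1]
--
--
--         for suff in persSuffs:
--             if isPast:
--                 infs.append(stemStart + " " + u"خواه" + suff + u"\u200c" + stemEnd)
--                 infs.append(stemStart + " " + u"خواه" + suff + u" " + stemEnd )
--
--                 # add the suffix prooun to all except the third person
--                 if suff != u"د":
--                     infs.append(stem + suff)
--                     infs.append(stemStart + " " + u"می" + stemEnd + suff)
--                     infs.append(stemStart + " " + u"می" + u"\u200c" + stemEnd + suff)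
--                     infs.append((u"داشت" + suff + " " + stemStart + " " + u"می" + stemEnd + suff).replace("  ", " "))
--                     infs.append(stemStart + " " + u"می" + u"\u200c" + stemEnd + suff)
--                     infs.append((u"داشت" + suff + " " + stemStart + " " + u"می" + u"\u200c" + stemEnd + suff).replace("  ", " "))
--                 else:
--                     infs.append(stemStart + " " + u"می" + stemEnd)
--                     infs.append(stemStart + " " + u"می" + u"\u200c" + stemEnd)
--                     infs.append((u"داشت"  + " " + stemStart + " " + u"می" + stemEnd).replace("  ", " "))
--                     infs.append(stemStart + " " + u"می" + u"\u200c" + stemEnd)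
--                     infs.append((u"داشت"  + " " + stemStart + " " + u"می" + u"\u200c" + stemEnd).replace("  ", " "))
--
--
--             else:
--                 infs.append(stemStart + " " + u"ب" + stemEnd + suff)
--                 infs.append(stemStart + " " + u"می" + stemEnd + suff)
--                 infs.append(stemStart + " " + u"می" + u"\u200c" + stemEnd + suff)
--                 infs.append((u"دار" + suff + " " + stemStart + " " + u"می" + stemEnd + suff).replace("  ", " "))
--                 infs.append(stemStart + " " + u"می" + u"\u200c" + stemEnd + suff)
--                 infs.append((u"دار" + suff + " " + stemStart + " " + u"می" + u"\u200c" + stemEnd + suff).replace("  ", " "))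
--
--
--         # for present and past participles (maazi naqli and mazi baeed)
--         if isPast:
--             for suff in persSuffs2:
--                 infs.append(stem + u"ه\u200c" + suff)
--
--             for suff in persSuffs3:
--                 infs.append(stem + u"ه\u200c" + suff)
--         """
--         for inf in infs:
--             out.write(inf + "--")
--         out.write("\n")
--         """
--         return infs
-- ===== SOURCE B (Python) =====
-- def inflectVerbs(stem, isPast):
--     ZWNJ = "\u200c"
--     if stem.count(" ") > 0:
--         parts = stem.split()
--         start, end = " ".join(parts[:-1]), parts[-1]
--     else:
--         start, end = "", stem
--
--     # Declarative row tables: a row is (tokens, cleanup?); a token is an int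
--     # variable (S=stemStart, E=stemEnd, W=whole stem, F=person suffix) or a
--     # literal string piece.  The generic renderer joins the pieces and, on
--     # cleanup rows, collapses double spaces.
--     S, E, W, F = 0, 1, 2, 3
--     PAST_HEAD = [([S, " ", "خواه", F, ZWNJ, E], False),
--                  ([S, " ", "خواه", F, " ", E], False)]
--     PAST_MAIN = [([W, F], False),
--                  ([S, " ", "می", E, F], False),
--                  ([S, " ", "می", ZWNJ, E, F], False),
--                  (["داشت", F, " ", S, " ", "می", E, F], True),
--                  ([S, " ", "می", ZWNJ, E, F], False),
--                  (["داشت", F, " ", S, " ", "می", ZWNJ, E, F], True)]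
--     PAST_3RD  = [([S, " ", "می", E], False),
--                  ([S, " ", "می", ZWNJ, E], False),
--                  (["داشت", " ", S, " ", "می", E], True),
--                  ([S, " ", "می", ZWNJ, E], False),
--                  (["داشت", " ", S, " ", "می", ZWNJ, E], True)]
--     PRES      = [([S, " ", "ب", E, F], False),
--                  ([S, " ", "می", E, F], False),
--                  ([S, " ", "می", ZWNJ, E, F], False),
--                  (["دار", F, " ", S, " ", "می", E, F], True),
--                  ([S, " ", "می", ZWNJ, E, F], False),
--                  (["دار", F, " ", S, " ", "می", ZWNJ, E, F], True)]
--
--     def render(toks, clean, suff):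
--         vals = [start, end, stem, suff]
--         text = "".join(vals[t] if isinstance(t, int) else t for t in toks)
--         return text.replace("  ", " ") if clean else text
--
--     infs = [render(toks, clean, f)
--             for f in ["م", "ی", "د", "یم", "ید", "ند"]
--             for (toks, clean) in ((PAST_HEAD + (PAST_3RD if f == "د" else PAST_MAIN))
--                                   if isPast else PRES)]
--     if isPast:
--         infs += [stem + "ه" + ZWNJ + f for f in
--                  ["ام", "ای", "است", "ایم", "اید", "اند",
--                   "بودم", "بودی", "بود", "بودیم", "بودید", "بودند",
--                   "باشم", "باشی", "باشد", "باشیم", "باشید", "باشند"]]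
--     return infs
-- ===== Notes on version B (the rewrite author's own statement) =====
-- stated objective: alternative
-- what changed: B is data-driven: the inflection rows become declarative token tables (literal pieces plus stemStart/stemEnd/stem/suffix variables, with a cleanup flag) selected per tense and rendered by one generic token interpreter over the suffix list, instead of A's imperative append/branch blocks.
import Mathlib
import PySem

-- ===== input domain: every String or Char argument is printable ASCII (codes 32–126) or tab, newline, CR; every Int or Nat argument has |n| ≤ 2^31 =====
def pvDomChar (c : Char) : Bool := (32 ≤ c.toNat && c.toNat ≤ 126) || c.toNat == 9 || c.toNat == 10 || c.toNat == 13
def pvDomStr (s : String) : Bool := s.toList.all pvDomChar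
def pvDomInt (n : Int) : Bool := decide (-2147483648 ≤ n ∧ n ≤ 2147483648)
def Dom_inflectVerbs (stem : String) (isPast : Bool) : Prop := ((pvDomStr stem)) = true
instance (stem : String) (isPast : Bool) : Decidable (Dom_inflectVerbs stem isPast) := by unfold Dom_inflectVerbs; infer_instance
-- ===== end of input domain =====

-- B replaces A's imperative append/branch blocks by declarative row tables rendered
-- by one generic token interpreter (alternative decomposition); return values only.

-- ===== PORT A =====
def inflectVerbs (stem : String) (isPast : Bool) : List String :=
  let persSuffs : List String := ["م", "ی", "د", "یم", "ید", "ند"]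
  let persSuffs2 : List String := ["ام", "ای", "است", "ایم", "اید", "اند"]
  let persSuffs3 : List String := ["بودم", "بودی", "بود", "بودیم", "بودید", "بودند", "باشم", "باشی", "باشد", "باشیم", "باشید", "باشند"]
  let p : String × String :=
    if PySem.Str.count stem " " > 0 then
      let bStem := PySem.Str.split₀ stem
      (PySem.Str.join " " (PySem.List.slice bStem none (some (-1))),
       (PySem.List.pyGet? bStem (-1)).getD "")   -- none = IndexError, excluded by Pre_
    else ("", stem)
  let stemStart := p.1
  let stemEnd := p.2
  let infs := persSuffs.foldl (fun infs suff =>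
    if isPast then
      let infs := infs ++ [stemStart ++ " " ++ "خواه" ++ suff ++ "\u200C" ++ stemEnd]
      let infs := infs ++ [stemStart ++ " " ++ "خواه" ++ suff ++ " " ++ stemEnd]
      if suff ≠ "د" then
        let infs := infs ++ [stem ++ suff]
        let infs := infs ++ [stemStart ++ " " ++ "می" ++ stemEnd ++ suff]
        let infs := infs ++ [stemStart ++ " " ++ "می" ++ "\u200C" ++ stemEnd ++ suff]
        let infs := infs ++ [PySem.Str.replace ("داشت" ++ suff ++ " " ++ stemStart ++ " " ++ "می" ++ stemEnd ++ suff) "  " " "]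
        let infs := infs ++ [stemStart ++ " " ++ "می" ++ "\u200C" ++ stemEnd ++ suff]
        infs ++ [PySem.Str.replace ("داشت" ++ suff ++ " " ++ stemStart ++ " " ++ "می" ++ "\u200C" ++ stemEnd ++ suff) "  " " "]
      else
        let infs := infs ++ [stemStart ++ " " ++ "می" ++ stemEnd]
        let infs := infs ++ [stemStart ++ " " ++ "می" ++ "\u200C" ++ stemEnd]
        let infs := infs ++ [PySem.Str.replace ("داشت" ++ " " ++ stemStart ++ " " ++ "می" ++ stemEnd) "  " " "]
        let infs := infs ++ [stemStart ++ " " ++ "می" ++ "\u200C" ++ stemEnd]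
        infs ++ [PySem.Str.replace ("داشت" ++ " " ++ stemStart ++ " " ++ "می" ++ "\u200C" ++ stemEnd) "  " " "]
    else
      let infs := infs ++ [stemStart ++ " " ++ "ب" ++ stemEnd ++ suff]
      let infs := infs ++ [stemStart ++ " " ++ "می" ++ stemEnd ++ suff]
      let infs := infs ++ [stemStart ++ " " ++ "می" ++ "\u200C" ++ stemEnd ++ suff]
      let infs := infs ++ [PySem.Str.replace ("دار" ++ suff ++ " " ++ stemStart ++ " " ++ "می" ++ stemEnd ++ suff) "  " " "]
      let infs := infs ++ [stemStart ++ " " ++ "می" ++ "\u200C" ++ stemEnd ++ suff]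
      infs ++ [PySem.Str.replace ("دار" ++ suff ++ " " ++ stemStart ++ " " ++ "می" ++ "\u200C" ++ stemEnd ++ suff) "  " " "]
    ) []
  if isPast then
    let infs := persSuffs2.foldl (fun infs suff => infs ++ [stem ++ "ه\u200C" ++ suff]) infs
    persSuffs3.foldl (fun infs suff => infs ++ [stem ++ "ه\u200C" ++ suff]) infs
  else infs

-- ===== PORT B =====
-- a token of B's row tables: a literal string piece or one of the four variables
inductive PvTok : Type
  | lit : String → PvTok
  | vS : PvTok   -- stemStart
  | vE : PvTok   -- stemEnd
  | vW : PvTok   -- whole stem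
  | vF : PvTok   -- person suffix
deriving DecidableEq, Repr

def pvPastHead : List (List PvTok × Bool) :=
  [([.vS, .lit " ", .lit "خواه", .vF, .lit "\u200C", .vE], false),
   ([.vS, .lit " ", .lit "خواه", .vF, .lit " ", .vE], false)]
def pvPastMain : List (List PvTok × Bool) :=
  [([.vW, .vF], false),
   ([.vS, .lit " ", .lit "می", .vE, .vF], false),
   ([.vS, .lit " ", .lit "می", .lit "\u200C", .vE, .vF], false),
   ([.lit "داشت", .vF, .lit " ", .vS, .lit " ", .lit "می", .vE, .vF], true),
   ([.vS, .lit " ", .lit "می", .lit "\u200C", .vE, .vF], false),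
   ([.lit "داشت", .vF, .lit " ", .vS, .lit " ", .lit "می", .lit "\u200C", .vE, .vF], true)]
def pvPast3rd : List (List PvTok × Bool) :=
  [([.vS, .lit " ", .lit "می", .vE], false),
   ([.vS, .lit " ", .lit "می", .lit "\u200C", .vE], false),
   ([.lit "داشت", .lit " ", .vS, .lit " ", .lit "می", .vE], true),
   ([.vS, .lit " ", .lit "می", .lit "\u200C", .vE], false),
   ([.lit "داشت", .lit " ", .vS, .lit " ", .lit "می", .lit "\u200C", .vE], true)]
def pvPres : List (List PvTok × Bool) :=
  [([.vS, .lit " ", .lit "ب", .vE, .vF], false),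
   ([.vS, .lit " ", .lit "می", .vE, .vF], false),
   ([.vS, .lit " ", .lit "می", .lit "\u200C", .vE, .vF], false),
   ([.lit "دار", .vF, .lit " ", .vS, .lit " ", .lit "می", .vE, .vF], true),
   ([.vS, .lit " ", .lit "می", .lit "\u200C", .vE, .vF], false),
   ([.lit "دار", .vF, .lit " ", .vS, .lit " ", .lit "می", .lit "\u200C", .vE, .vF], true)]

def pvTokVal (start en stem suff : String) : PvTok → String
  | .lit s => s
  | .vS => start
  | .vE => en
  | .vW => stem
  | .vF => suff

def inflectVerbs_alt (stem : String) (isPast : Bool) : List String :=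
  let p : String × String :=
    if PySem.Str.count stem " " > 0 then
      let parts := PySem.Str.split₀ stem
      (PySem.Str.join " " (PySem.List.slice parts none (some (-1))),
       (PySem.List.pyGet? parts (-1)).getD "")
    else ("", stem)
  let start := p.1
  let en := p.2
  let render : List PvTok → Bool → String → String := fun toks clean suff =>
    let text := (toks.map (pvTokVal start en stem suff)).foldl (· ++ ·) ""
    if clean then PySem.Str.replace text "  " " " else text
  let infs := (["م", "ی", "د", "یم", "ید", "ند"] : List String).flatMap (fun f =>
    (if isPast then pvPastHead ++ (if f = "د" then pvPast3rd else pvPastMain) else pvPres).map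
      (fun r => render r.1 r.2 f))
  if isPast then
    infs ++ (["ام", "ای", "است", "ایم", "اید", "اند",
              "بودم", "بودی", "بود", "بودیم", "بودید", "بودند",
              "باشم", "باشی", "باشد", "باشیم", "باشید", "باشند"] : List String).map
        (fun f => stem ++ "ه" ++ "\u200C" ++ f)
  else infs

-- ===== PRECONDITION & SPEC =====
-- Pre_ excludes stems that contain a space but split to nothing (all-whitespace):
-- there A's bStem[-1] raises IndexError (B raises the same way).
def Pre_inflectVerbs (stem : String) (isPast : Bool) : Prop :=
  PySem.Str.count stem " " > 0 → PySem.Str.split₀ stem ≠ []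
instance (stem : String) (isPast : Bool) : Decidable (Pre_inflectVerbs stem isPast) := by unfold Pre_inflectVerbs; infer_instance
def pvWitness_inflectVerbs : String × Bool := ("go x", true)

def Spec_inflectVerbs (stem : String) (isPast : Bool) (out : List String) : Prop := out = inflectVerbs_alt stem isPast
instance (stem : String) (isPast : Bool) (out : List String) : Decidable (Spec_inflectVerbs stem isPast out) := by unfold Spec_inflectVerbs; infer_instance

-- ===== CLAIM =====
def Claim_equal_inflectVerbs : Prop := ∀ (stem : String) (isPast : Bool), Dom_inflectVerbs stem isPast → Pre_inflectVerbs stem isPast → Spec_inflectVerbs stem isPast (inflectVerbs stem isPast)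

-- ===== LEMMAS AND PROOFS =====

-- ===== VERDICT =====
theorem inflectVerbs_spec : Claim_equal_inflectVerbs := by
  intro stem isPast _ _
  unfold Spec_inflectVerbs inflectVerbs inflectVerbs_alt
  cases isPast <;>
    simp [pvPastHead, pvPastMain, pvPast3rd, pvPres, pvTokVal,
      List.foldl, List.flatMap, List.map, String.append_assoc]
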